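-- pv_equiv track=rewrite | github.com/greenfox-velox/agyenes | week-04/day-4/9.py | add_star
-- ===== SOURCE A (Python) =====
-- def add_star(string):
--     first_letter = string[0]
--     if len(string) == 1:
--         new_string = first_letter + "*"
--         return new_string
--     else:
--         new_string = first_letter + "*"
--         return new_string + add_star(string[1:len(string)])
-- ===== SOURCE B (Python) =====
-- def add_star(string):
--     return "".join(c + "*" for c in string)
-- ===== Notes on version B (the rewrite author's own statement) =====
-- stated objective: faster
-- what changed: Replaces recursion-on-the-tail (repeated slicing, quadratic concatenation) with a single join over the characters.
import Mathlib
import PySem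

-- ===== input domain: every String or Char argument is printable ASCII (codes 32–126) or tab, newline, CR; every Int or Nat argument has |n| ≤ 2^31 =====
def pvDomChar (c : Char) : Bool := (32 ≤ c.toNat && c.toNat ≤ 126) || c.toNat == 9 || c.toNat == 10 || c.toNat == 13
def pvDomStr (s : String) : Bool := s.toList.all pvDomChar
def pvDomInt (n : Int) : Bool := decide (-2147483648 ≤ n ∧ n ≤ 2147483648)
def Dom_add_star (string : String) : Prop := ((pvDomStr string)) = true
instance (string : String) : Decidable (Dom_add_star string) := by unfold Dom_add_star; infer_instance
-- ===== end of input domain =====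

-- B replaces A's tail recursion (with quadratic slicing/concatenation) by a single join over the characters; return value only.


-- ===== PORT A =====
-- A recurses: first_letter + "*", and if len > 1 appends add_star(string[1:]).
-- Ported as structural recursion on the character list; the [] case is unreachable
-- under Pre_ (Python raises IndexError on string[0] there).
def add_star_go : List Char → String
  | [] => ""
  | [c] => String.ofList [c, '*']
  | c :: rest => String.ofList [c, '*'] ++ add_star_go rest

def add_star (string : String) : String := add_star_go string.toList

-- ===== PORT B =====
-- "".join(c + "*" for c in string)
def add_star_alt (string : String) : String :=
  String.ofList (string.toList.flatMap (fun c => [c, '*']))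

-- ===== PRECONDITION & SPEC =====
-- Pre_ excludes only the empty string, where A raises IndexError.
def Pre_add_star (string : String) : Prop := string ≠ ""
instance (string : String) : Decidable (Pre_add_star string) := by unfold Pre_add_star; infer_instance
def pvWitness_add_star : String := "ab"

def Spec_add_star (string : String) (out : String) : Prop := out = add_star_alt string
instance (string : String) (out : String) : Decidable (Spec_add_star string out) := by unfold Spec_add_star; infer_instance

-- ===== CLAIM (what is proved, stated in full; the proofs are below) =====
def Claim_equal_add_star : Prop := ∀ (string : String), Dom_add_star string → Pre_add_star string → Spec_add_star string (add_star string)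

-- ===== LEMMAS AND PROOFS =====
theorem add_star_go_eq (l : List Char) :
    add_star_go l = String.ofList (l.flatMap (fun c => [c, '*'])) := by
  induction l with
  | nil => rfl
  | cons c rest ih =>
    cases rest with
    | nil => rfl
    | cons d t =>
      simp only [add_star_go, ih, List.flatMap_cons]
      rw [← String.ofList_append]

-- ===== VERDICT (by name: the statement is the Claim_ definition above) =====
theorem add_star_spec : Claim_equal_add_star := by
  intro s _ _
  unfold Spec_add_star add_star add_star_alt
  exact add_star_go_eq s.toList
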